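-- pv_equiv track=rewrite | github.com/carllikan/I-Can-Study-System-v1.0 | gs document process cloud function.py | expand_chunk
-- ===== SOURCE A (Python) =====
-- def expand_chunk(chunk, article):
--     start_index = article.find(chunk)
--     if start_index == -1:
--         return None
--
--     punctuation = {'.', '!', '?', ':'}
--
--     end_index_forward = start_index + len(chunk)
--     while end_index_forward < len(article) and article[end_index_forward] not in punctuation:
--         end_index_forward += 1
--
--     start_index_backward = start_index
--     while start_index_backward > 0 and article[start_index_backward - 1] not in punctuation:
--         start_index_backward -= 1
--
--     chunkExpand = article[start_index_backward:end_index_forward + 1]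
--     return chunkExpand
-- ===== SOURCE B (Python) =====
-- def expand_chunk(chunk, article):
--     start_index = article.find(chunk)
--     if start_index == -1:
--         return None
--
--     punctuation = {'.', '!', '?', ':'}
--     i, j = start_index, start_index + len(chunk)
--
--     fwd = []
--     for c in article[j:]:
--         fwd.append(c)
--         if c in punctuation:
--             break
--
--     bwd = []
--     for c in article[:i]:
--         if c in punctuation:
--             bwd = []
--         else:
--             bwd.append(c)
--
--     return ''.join(bwd) + article[i:j] + ''.join(fwd)
-- ===== Notes on version B (the rewrite author's own statement) =====
-- stated objective: alternative
-- what changed: Replaces A's two index-stepping while-loops and final slice with piecewise construction: a take-until-punctuation scan of the suffix, a reset-at-punctuation fold over the prefix, and concatenation of the three pieces.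
import Mathlib
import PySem

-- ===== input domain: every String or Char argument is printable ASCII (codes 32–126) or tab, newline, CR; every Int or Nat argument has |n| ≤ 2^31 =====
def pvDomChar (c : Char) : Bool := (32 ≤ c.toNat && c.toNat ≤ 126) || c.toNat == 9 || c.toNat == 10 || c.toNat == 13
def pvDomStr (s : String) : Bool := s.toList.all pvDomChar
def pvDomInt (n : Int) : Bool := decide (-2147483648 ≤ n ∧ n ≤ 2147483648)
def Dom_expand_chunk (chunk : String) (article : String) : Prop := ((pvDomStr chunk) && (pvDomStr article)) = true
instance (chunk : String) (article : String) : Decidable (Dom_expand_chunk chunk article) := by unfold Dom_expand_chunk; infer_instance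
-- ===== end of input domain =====

-- B replaces A's two index-stepping while-loops and final slice by building the result
-- from three pieces (reset-scan of the prefix, matched span, take-until-punct scan of the
-- suffix); same cost, alternative structure.

-- ===== PORT A =====
def pvPunct : List Char := ['.', '!', '?', ':']

-- while end_index_forward < len(article) and article[end_index_forward] not in punctuation: += 1
def pvFwdA (s : List Char) (e : Nat) : Nat :=
  if h : e < s.length ∧ ¬ pvPunct.contains (s.getD e ' ') then pvFwdA s (e + 1) else e
termination_by s.length - e
decreasing_by omega

-- while start_index_backward > 0 and article[start_index_backward - 1] not in punctuation: -= 1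
def pvBwdA (s : List Char) (b : Nat) : Nat :=
  if 0 < b ∧ ¬ pvPunct.contains (s.getD (b - 1) ' ') then pvBwdA s (b - 1) else b
termination_by b
decreasing_by omega

def expand_chunk (chunk : String) (article : String) : Option String :=
  let start_index := PySem.Str.find article chunk
  if start_index = -1 then none
  else
    let i := start_index.toNat
    let e := pvFwdA article.toList (i + (PySem.Str.len chunk).toNat)
    let b := pvBwdA article.toList i
    some (PySem.Str.slice article (some (b : Int)) (some ((e : Int) + 1)))

-- ===== PORT B =====
def pvPunctB : List Char := ['.', '!', '?', ':']
-- for c in tail: fwd.append(c); if c in punctuation: break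
def pvFwdB (l : List Char) : List Char :=
  match l with
  | [] => []
  | c :: cs => if pvPunctB.contains c then [c] else c :: pvFwdB cs

-- for c in head: bwd = [] if c in punctuation else bwd + [c]
def pvBwdB (l : List Char) : List Char :=
  l.foldl (fun acc c => if pvPunctB.contains c then [] else acc ++ [c]) []

def expand_chunk_alt (chunk : String) (article : String) : Option String :=
  let s := article.toList
  let i := PySem.Str.find article chunk
  if i = -1 then none
  else
    let j := i + PySem.Str.len chunk
    let bwd := pvBwdB (PySem.List.slice s none (some i))
    let mid := PySem.List.slice s (some i) (some j)
    let fwd := pvFwdB (PySem.List.slice s (some j) none)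
    some (String.ofList (bwd ++ mid ++ fwd))

-- ===== PRECONDITION & SPEC =====
def Spec_expand_chunk (chunk : String) (article : String) (out : Option String) : Prop := out = expand_chunk_alt chunk article
instance (chunk : String) (article : String) (out : Option String) : Decidable (Spec_expand_chunk chunk article out) := by unfold Spec_expand_chunk; infer_instance

-- ===== CLAIM (what is proved, stated in full; the proofs are below) =====
def Claim_equal_expand_chunk : Prop := ∀ (chunk : String) (article : String), Dom_expand_chunk chunk article → Spec_expand_chunk chunk article (expand_chunk chunk article)

-- ===== LEMMAS AND PROOFS =====

theorem pvFwdA_ge (s : List Char) (e : Nat) : e ≤ pvFwdA s e := by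
  fun_induction pvFwdA s e with
  | case1 e h ih => omega
  | case2 e h => omega

theorem pvBwdA_le (s : List Char) (b : Nat) : pvBwdA s b ≤ b := by
  fun_induction pvBwdA s b with
  | case1 b h ih => omega
  | case2 b h => omega

theorem pvPunctB_eq : pvPunctB = pvPunct := rfl

theorem pvBwdB_append_singleton (l : List Char) (c : Char) :
    pvBwdB (l ++ [c]) = if pvPunct.contains c then [] else pvBwdB l ++ [c] := by
  unfold pvBwdB
  rw [List.foldl_append, pvPunctB_eq]
  simp

-- A's forward loop result, as the piece B takes from the suffix
theorem pvFwd_eq (s : List Char) (j : Nat) (hj : j ≤ s.length) :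
    pvFwdB (s.drop j) = (s.drop j).take (pvFwdA s j + 1 - j) := by
  fun_induction pvFwdA s j with
  | case1 j h ih =>
    obtain ⟨hlt, hnp⟩ := h
    have hd : s.drop j = s[j] :: s.drop (j + 1) := List.drop_eq_getElem_cons hlt
    have hg : s.getD j ' ' = s[j] := List.getD_eq_getElem s ' ' hlt
    have hge : j + 1 ≤ pvFwdA s (j + 1) := pvFwdA_ge s (j + 1)
    have harith : pvFwdA s (j + 1) + 1 - j = (pvFwdA s (j + 1) + 1 - (j + 1)) + 1 := by omega
    rw [hd, harith, List.take_succ_cons]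
    rw [hg] at hnp
    unfold pvFwdB
    rw [pvPunctB_eq, if_neg hnp]
    rw [ih (by omega)]
  | case2 j h =>
    by_cases hlt : j < s.length
    · have hnp : pvPunct.contains (s.getD j ' ') = true := by
        by_contra hc
        exact h ⟨hlt, by simpa using hc⟩
      have hd : s.drop j = s[j] :: s.drop (j + 1) := List.drop_eq_getElem_cons hlt
      have hg : s.getD j ' ' = s[j] := List.getD_eq_getElem s ' ' hlt
      rw [hg] at hnp
      have harith : j + 1 - j = 0 + 1 := by omega
      rw [hd, harith, List.take_succ_cons, List.take_zero]
      unfold pvFwdB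
      rw [pvPunctB_eq, if_pos hnp]
    · have : s.drop j = [] := List.drop_eq_nil_of_le (by omega)
      rw [this]
      simp [pvFwdB]

-- A's backward loop result, as the piece B keeps from the prefix
theorem pvBwd_eq (s : List Char) (b : Nat) (hb : b ≤ s.length) :
    pvBwdB (s.take b) = (s.take b).drop (pvBwdA s b) := by
  fun_induction pvBwdA s b with
  | case1 b h ih =>
    obtain ⟨hpos, hnp⟩ := h
    obtain ⟨b', rfl⟩ : ∃ b', b = b' + 1 := ⟨b - 1, by omega⟩
    simp only [Nat.add_sub_cancel] at hnp ih ⊢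
    have hlt : b' < s.length := by omega
    have hg : s.getD b' ' ' = s[b'] := List.getD_eq_getElem s ' ' hlt
    have ht : s.take (b' + 1) = s.take b' ++ [s[b']] := by
      rw [List.take_add_one, List.getElem?_eq_getElem hlt]
      rfl
    rw [hg] at hnp
    have hlen : pvBwdA s b' ≤ (s.take b').length := by
      have := pvBwdA_le s b'
      rw [List.length_take]
      omega
    rw [ht, pvBwdB_append_singleton, if_neg hnp,
        List.drop_append_of_le_length hlen, ih (by omega)]
  | case2 b h =>
    by_cases hpos : 0 < b
    · have hnp : pvPunct.contains (s.getD (b - 1) ' ') = true := by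
        by_contra hc
        exact h ⟨hpos, by simpa using hc⟩
      obtain ⟨b', rfl⟩ : ∃ b', b = b' + 1 := ⟨b - 1, by omega⟩
      simp only [Nat.add_sub_cancel] at hnp
      have hlt : b' < s.length := by omega
      have hg : s.getD b' ' ' = s[b'] := List.getD_eq_getElem s ' ' hlt
      have ht : s.take (b' + 1) = s.take b' ++ [s[b']] := by
        rw [List.take_add_one, List.getElem?_eq_getElem hlt]
        rfl
      rw [hg] at hnp
      rw [ht, pvBwdB_append_singleton, if_pos hnp]
      symm
      apply List.drop_eq_nil_of_le
      simp only [List.length_append, List.length_take, List.length_cons, List.length_nil]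
      omega
    · have hb0 : b = 0 := by omega
      subst hb0
      rfl

theorem pvSplit3 (s : List Char) (b i j m : Nat) (hbi : b ≤ i) (hij : i ≤ j) (hjm : j ≤ m) :
    (s.drop b).take (m - b) = (s.take i).drop b ++ ((s.drop i).take (j - i) ++ (s.drop j).take (m - j)) := by
  have h1 : m - b = (i - b) + ((j - i) + (m - j)) := by omega
  have h2 : b + (i - b) = i := by omega
  have h3 : i + (j - i) = j := by omega
  rw [h1, List.take_add, List.take_add, List.drop_drop, List.drop_drop, h2, h3, List.drop_take]

-- ===== VERDICT (by name: the statement is the Claim_ definition above) =====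

theorem expand_chunk_spec : Claim_equal_expand_chunk := by
  intro chunk article _
  unfold Spec_expand_chunk expand_chunk expand_chunk_alt
  by_cases hf : PySem.Str.find article chunk = -1
  · have hf' : PySem.Chars.find article.toList chunk.toList = -1 := by
      rw [← PySem.Str.find_eq]
      exact hf
    simp [hf']
  · simp only [if_neg hf, Option.some.injEq]
    have h0 : 0 ≤ PySem.Str.find article chunk := by
      have := PySem.Chars.neg_one_le_find article.toList chunk.toList
      rw [PySem.Str.find_eq] at hf ⊢
      omega
    set s := article.toList with hs
    set f := PySem.Str.find article chunk with hfdef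
    have hfe : f = PySem.Chars.find s chunk.toList := PySem.Str.find_eq article chunk
    have hflen : f ≤ (s.length : Int) := by rw [hfe]; exact PySem.Chars.find_le_length s chunk.toList
    have hil : f.toNat ≤ s.length := by omega
    have hpref : chunk.toList <+: s.drop (PySem.Chars.find s chunk.toList).toNat := by
      refine (PySem.Chars.find_spec ?_).1
      rw [← hfe]; exact h0
    rw [← hfe] at hpref
    have hjl : f.toNat + chunk.toList.length ≤ s.length := by
      have := hpref.length_le
      rw [List.length_drop] at this
      omega
    have hlen : PySem.Str.len chunk = (chunk.toList.length : Int) := PySem.Str.len_eq chunk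
    have hlenN : (PySem.Str.len chunk).toNat = chunk.toList.length := by rw [hlen]; omega
    -- names
    set iN := f.toNat with hiN
    set jN := iN + chunk.toList.length with hjN
    have hjcast : (f + PySem.Str.len chunk) = (jN : Int) := by rw [hlen]; omega
    have he := pvFwdA_ge s jN
    have hb := pvBwdA_le s iN
    apply String.toList_inj.mp
    rw [String.toList_ofList, PySem.Str.toList_slice, PySem.Chars.slice_eq_listSlice]
    rw [hlenN, hjcast]
    rw [PySem.List.slice_to s h0, PySem.List.slice_from s (by omega : (0:Int) ≤ (jN : Int)),
        PySem.List.slice_toNat s h0 (by omega : (0:Int) ≤ (jN : Int))]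
    have hNN : ((jN : Int)).toNat = jN := by omega
    rw [hNN]
    have hcast2 : ((pvFwdA s jN : Int) + 1) = (((pvFwdA s jN + 1 : Nat)) : Int) := by push_cast; ring
    rw [hcast2, PySem.List.slice_natCast]
    rw [← hiN]
    rw [pvBwd_eq s iN hil, pvFwd_eq s jN (by omega), List.append_assoc]
    simp only [← hs]
    exact pvSplit3 s (pvBwdA s iN) iN jN (pvFwdA s jN + 1) (by omega) (by omega) (by omega)
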